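-- pv_equiv track=rewrite | github.com/Jpscarone/ProyectoGarmin | app/services/analysis_v2/structured.py | _dominant_zone
-- ===== SOURCE A (Python) =====
-- def _dominant_zone(zones: set[str]) -> str | None:
--     if not zones:
--         return None
--     ordered = ["z1", "z2", "z3", "z4", "z5"]
--     for zone in ordered:
--         if zone in zones:
--             return zone
--     return None
-- ===== SOURCE B (Python) =====
-- _VALID = {"z1", "z2", "z3", "z4", "z5"}
--
-- def _dominant_zone(zones):
--     present = zones & _VALID
--     return min(present) if present else None
-- ===== Notes on version B (the rewrite author's own statement) =====
-- stated objective: simpler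
-- what changed: Replaces the early-exit scan over the hard-coded priority list with set intersection against the valid zones followed by min, exploiting that lexicographic order on z1..z5 coincides with priority order.
import Mathlib
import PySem

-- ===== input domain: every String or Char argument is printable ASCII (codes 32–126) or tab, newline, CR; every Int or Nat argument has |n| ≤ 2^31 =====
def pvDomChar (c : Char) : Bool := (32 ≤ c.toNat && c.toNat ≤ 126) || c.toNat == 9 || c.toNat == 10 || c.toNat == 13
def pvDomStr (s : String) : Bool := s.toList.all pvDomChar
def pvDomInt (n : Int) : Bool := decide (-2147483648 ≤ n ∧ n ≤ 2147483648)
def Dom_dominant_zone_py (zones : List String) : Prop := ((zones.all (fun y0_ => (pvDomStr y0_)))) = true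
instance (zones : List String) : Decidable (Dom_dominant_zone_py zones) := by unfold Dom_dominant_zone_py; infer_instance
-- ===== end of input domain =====

-- B replaces A's early-exit priority scan by intersecting with the valid zone set and taking the
-- lexicographic minimum (which coincides with priority order on "z1".."z5"): simpler, same result.


-- ===== PORT A =====
-- the 'for zone in ordered: if zone in zones: return zone' loop, step for step
def dzScan (zones : List String) : List String → Option String
  | [] => none
  | z :: rest => if zones.contains z then some z else dzScan zones rest

def dominant_zone_py (zones : List String) : Option String :=
  if zones = [] then none
  else dzScan zones ["z1", "z2", "z3", "z4", "z5"]

-- ===== PORT B =====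
-- present = zones & _VALID ; min(present) if present else None
def dominant_zone_py_alt (zones : List String) : Option String :=
  let present := zones.filter (fun z => ["z1", "z2", "z3", "z4", "z5"].contains z)
  PySem.List.min? present (fun x => x)

-- ===== PRECONDITION & SPEC =====
def Spec_dominant_zone_py (zones : List String) (out : Option String) : Prop := out = dominant_zone_py_alt zones
instance (zones : List String) (out : Option String) : Decidable (Spec_dominant_zone_py zones out) := by unfold Spec_dominant_zone_py; infer_instance

-- ===== CLAIM (what is proved, stated in full; the proofs are below) =====
def Claim_equal_dominant_zone_py : Prop := ∀ (zones : List String), Dom_dominant_zone_py zones → Spec_dominant_zone_py zones (dominant_zone_py zones)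

-- ===== LEMMAS AND PROOFS =====

-- min? with the identity key returns exactly the least element, when one is named
lemma min?_eq_of_least (xs : List String) (z : String) (hz : z ∈ xs)
    (hle : ∀ y ∈ xs, z ≤ y) : PySem.List.min? xs (fun x => x) = some z := by
  cases hmm : PySem.List.min? xs (fun x => x) with
  | none =>
      have : xs = [] := (PySem.List.min?_eq_none_iff xs _).mp hmm
      simp [this] at hz
  | some m =>
      have hmem : m ∈ xs := PySem.List.min?_mem hmm
      have h1 : m ≤ z := PySem.List.min?_isMin hmm z hz
      have h2 : z ≤ m := hle m hmem
      exact congrArg some (le_antisymm h1 h2)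

lemma scan_eq_min (zones : List String) :
    dzScan zones ["z1", "z2", "z3", "z4", "z5"] =
      PySem.List.min? (zones.filter (fun z => ["z1", "z2", "z3", "z4", "z5"].contains z))
        (fun x => x) := by
  set f : String → Bool := fun z => ["z1", "z2", "z3", "z4", "z5"].contains z with hf
  have hmemf : ∀ y, y ∈ zones.filter f ↔ y ∈ zones ∧
      (y = "z1" ∨ y = "z2" ∨ y = "z3" ∨ y = "z4" ∨ y = "z5") := by
    intro y
    simp [hf, List.mem_filter]
  by_cases h1 : "z1" ∈ zones
  · have := min?_eq_of_least (zones.filter f) "z1"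
      ((hmemf "z1").mpr ⟨h1, by decide⟩)
      (by
        intro y hy
        rcases ((hmemf y).mp hy).2 with h | h | h | h | h <;> subst h <;> norm_num <;> decide)
    simp [dzScan, h1, this]
  · by_cases h2 : "z2" ∈ zones
    · have := min?_eq_of_least (zones.filter f) "z2"
        ((hmemf "z2").mpr ⟨h2, by decide⟩)
        (by
          intro y hy
          rcases ((hmemf y).mp hy).2 with h | h | h | h | h <;> subst h
          · exact absurd ((hmemf "z1").mp hy).1 h1
          all_goals (norm_num <;> decide))
      simp [dzScan, h1, h2, this]
    · by_cases h3 : "z3" ∈ zones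
      · have := min?_eq_of_least (zones.filter f) "z3"
          ((hmemf "z3").mpr ⟨h3, by decide⟩)
          (by
            intro y hy
            rcases ((hmemf y).mp hy).2 with h | h | h | h | h <;> subst h
            · exact absurd ((hmemf "z1").mp hy).1 h1
            · exact absurd ((hmemf "z2").mp hy).1 h2
            all_goals (norm_num <;> decide))
        simp [dzScan, h1, h2, h3, this]
      · by_cases h4 : "z4" ∈ zones
        · have := min?_eq_of_least (zones.filter f) "z4"
            ((hmemf "z4").mpr ⟨h4, by decide⟩)
            (by
              intro y hy
              rcases ((hmemf y).mp hy).2 with h | h | h | h | h <;> subst h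
              · exact absurd ((hmemf "z1").mp hy).1 h1
              · exact absurd ((hmemf "z2").mp hy).1 h2
              · exact absurd ((hmemf "z3").mp hy).1 h3
              all_goals (norm_num <;> decide))
          simp [dzScan, h1, h2, h3, h4, this]
        · by_cases h5 : "z5" ∈ zones
          · have := min?_eq_of_least (zones.filter f) "z5"
              ((hmemf "z5").mpr ⟨h5, by decide⟩)
              (by
                intro y hy
                rcases ((hmemf y).mp hy).2 with h | h | h | h | h <;> subst h
                · exact absurd ((hmemf "z1").mp hy).1 h1
                · exact absurd ((hmemf "z2").mp hy).1 h2
                · exact absurd ((hmemf "z3").mp hy).1 h3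
                · exact absurd ((hmemf "z4").mp hy).1 h4
                · exact le_refl _)
            simp [dzScan, h1, h2, h3, h4, h5, this]
          · have hnil : zones.filter f = [] := by
              rw [List.filter_eq_nil_iff]
              intro y hy hfy
              have : y = "z1" ∨ y = "z2" ∨ y = "z3" ∨ y = "z4" ∨ y = "z5" :=
                ((hmemf y).mp (List.mem_filter.mpr ⟨hy, hfy⟩)).2
              rcases this with h | h | h | h | h <;> subst h <;>
                first
                | exact h1 hy
                | exact h2 hy
                | exact h3 hy
                | exact h4 hy
                | exact h5 hy
            simp only [hnil]
            simp [dzScan, h1, h2, h3, h4, h5]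
            exact ((PySem.List.min?_eq_none_iff ([] : List String) (fun x => x)).mpr rfl).symm

-- ===== VERDICT (by name: the statement is the Claim_ definition above) =====
theorem dominant_zone_py_spec : Claim_equal_dominant_zone_py := by
  intro zones _
  unfold Spec_dominant_zone_py dominant_zone_py dominant_zone_py_alt
  by_cases hz : zones = []
  · subst hz; decide
  · simp only [hz, if_false]
    exact scan_eq_min zones
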